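-- pv_equiv track=rewrite | github.com/NicoFuentese/Fundamentos-de-Algoritmos-PUCV | MODULO3/3.1_listas.py | NumeroDiv
-- ===== SOURCE A (Python) =====
-- def NumeroDiv (lista):
--     for i in lista:
--         contador = 0
--         for j in lista:
--             if (j % i == 0):
--                 contador += 1
--             if (contador == len(lista)):
--                 return i
-- ===== SOURCE B (Python) =====
-- def NumeroDiv(lista):
--     # gcd of all elements (Euclid by hand, no imports), then first element dividing it
--     g = 0
--     for x in lista:
--         x = abs(x)
--         while x:
--             g, x = x, g % x
--     for i in lista:
--         if g % i == 0:
--             return i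
-- ===== Notes on version B (the rewrite author's own statement) =====
-- stated objective: faster
-- what changed: B folds a hand-written Euclid gcd over the list once and then returns the first element dividing that gcd, replacing A's inner divisibility-count scan per element.
import Mathlib
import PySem

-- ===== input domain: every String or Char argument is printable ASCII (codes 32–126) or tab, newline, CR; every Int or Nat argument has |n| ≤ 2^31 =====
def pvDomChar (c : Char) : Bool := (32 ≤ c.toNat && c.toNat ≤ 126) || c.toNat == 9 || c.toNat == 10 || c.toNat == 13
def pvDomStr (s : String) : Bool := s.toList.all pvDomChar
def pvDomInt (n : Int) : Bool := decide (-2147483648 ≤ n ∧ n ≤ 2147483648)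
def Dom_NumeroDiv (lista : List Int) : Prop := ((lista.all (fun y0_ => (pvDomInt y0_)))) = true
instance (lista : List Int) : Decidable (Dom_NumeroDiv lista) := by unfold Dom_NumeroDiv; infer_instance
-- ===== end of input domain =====

-- B replaces A's quadratic per-element divisibility count by one gcd fold plus one scan.

-- ===== PORT A =====
-- inner loop: for j in lista, counting divisors, early return when contador == len(lista)
def NumeroDiv_inner (i n : Int) : List Int → Int → Option Int
  | [], _ => none
  | j :: rest, contador =>
    let contador := if PySem.Int.mod j i = 0 then contador + 1 else contador
    if contador = n then some i else NumeroDiv_inner i n rest contador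

-- outer loop: for i in lista
def NumeroDiv_outer (lista : List Int) : List Int → Option Int
  | [] => none
  | i :: rest =>
    match NumeroDiv_inner i (lista.length : Int) lista 0 with
    | some r => some r
    | none => NumeroDiv_outer lista rest

def NumeroDiv (lista : List Int) : Option Int := NumeroDiv_outer lista lista

-- ===== PORT B =====
-- Source B's hand-written Euclid: while x: g, x = x, g % x   (g, x ≥ 0, so Python % = Nat %)
def pyGcdStep (g x : Nat) : Nat :=
  if h : x = 0 then g else pyGcdStep x (g % x)
termination_by x
decreasing_by exact Nat.mod_lt _ (Nat.pos_of_ne_zero h)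

-- Source B's second loop: first i with g % i == 0
def NumeroDiv_altFind (g : Nat) : List Int → Option Int
  | [] => none
  | i :: rest => if PySem.Int.mod (g : Int) i = 0 then some i else NumeroDiv_altFind g rest

def NumeroDiv_alt (lista : List Int) : Option Int :=
  NumeroDiv_altFind (lista.foldl (fun g x => pyGcdStep g x.natAbs) 0) lista

-- ===== PRECONDITION & SPEC =====
-- Pre_ excludes exactly the lists on which Python A raises ZeroDivisionError (j % 0): those where a
-- 0 occurs before any element dividing the whole list; Source B raises on exactly the same lists.
def Pre_NumeroDiv (lista : List Int) : Prop :=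
  0 ∈ lista → ∃ x ∈ lista.take (lista.idxOf 0), ∀ j ∈ lista, PySem.Int.mod j x = 0
instance (lista : List Int) : Decidable (Pre_NumeroDiv lista) := by unfold Pre_NumeroDiv; infer_instance

def pvWitness_NumeroDiv : List Int := [3, 6, 9]

def Spec_NumeroDiv (lista : List Int) (out : Option Int) : Prop := out = NumeroDiv_alt lista
instance (lista : List Int) (out : Option Int) : Decidable (Spec_NumeroDiv lista out) := by unfold Spec_NumeroDiv; infer_instance

-- ===== CLAIM (what is proved, stated in full; the proofs are below) =====
def Claim_equal_NumeroDiv : Prop := ∀ (lista : List Int), Dom_NumeroDiv lista → Pre_NumeroDiv lista → Spec_NumeroDiv lista (NumeroDiv lista)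

-- ===== LEMMAS AND PROOFS =====

-- the hand-written Euclid computes Nat.gcd
theorem pyGcdStep_eq_gcd (x : Nat) : ∀ g : Nat, pyGcdStep g x = Nat.gcd g x := by
  induction x using Nat.strong_induction_on with
  | _ x ih =>
    intro g
    unfold pyGcdStep
    split
    · simp [*]
    · rename_i h
      rw [ih (g % x) (Nat.mod_lt _ (Nat.pos_of_ne_zero h))]
      rw [Nat.gcd_comm x (g % x), ← Nat.gcd_rec, Nat.gcd_comm]

theorem dvd_cast_gcd (i : Int) (a b : Nat) :
    i ∣ ((Nat.gcd a b : Nat) : Int) ↔ i ∣ (a : Int) ∧ i ∣ (b : Int) := by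
  rw [← Int.gcd_natCast_natCast]
  constructor
  · intro h
    exact ⟨h.trans (Int.gcd_dvd_left (a:Int) (b:Int)), h.trans (Int.gcd_dvd_right (a:Int) (b:Int))⟩
  · rintro ⟨h1, h2⟩
    exact dvd_gcd h1 h2

-- divisibility of the gcd fold
theorem dvd_fold_gcd (i : Int) : ∀ (l : List Int) (g0 : Nat),
    i ∣ ((l.foldl (fun g x => Nat.gcd g x.natAbs) g0 : Nat) : Int) ↔
      (i ∣ (g0 : Int) ∧ ∀ j ∈ l, i ∣ j) := by
  intro l
  induction l with
  | nil => simp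
  | cons x rest ih =>
    intro g0
    simp only [List.foldl_cons, ih, dvd_cast_gcd, Int.dvd_natAbs, List.mem_cons]
    constructor
    · rintro ⟨⟨h1, h2⟩, h3⟩
      exact ⟨h1, fun j hj => hj.elim (fun e => e ▸ h2) (h3 j)⟩
    · rintro ⟨h1, h2⟩
      exact ⟨⟨h1, h2 x (Or.inl rfl)⟩, fun j hj => h2 j (Or.inr hj)⟩

-- characterization of A's inner loop
theorem inner_eq (i n : Int) : ∀ (js : List Int) (c : Int), c + (js.length : Int) ≤ n →
    NumeroDiv_inner i n js c =
      if js ≠ [] ∧ c + (js.length : Int) = n ∧ ∀ j ∈ js, PySem.Int.mod j i = 0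
      then some i else none := by
  intro js
  induction js with
  | nil => intro c _; simp [NumeroDiv_inner]
  | cons j rest ih =>
    intro c h
    simp only [List.length_cons] at h ⊢
    push_cast at h ⊢
    unfold NumeroDiv_inner
    by_cases hdvd : PySem.Int.mod j i = 0
    · simp only [hdvd, ite_true]
      by_cases hc : c + 1 = n
      · have hlen : rest.length = 0 := by omega
        have hrest : rest = [] := List.length_eq_zero_iff.mp hlen
        subst hrest
        simp [hc, hdvd]
      · rw [if_neg hc, ih (c + 1) (by omega)]
        by_cases hr : rest = []
        · subst hr; simp; omega
        · simp only [ne_eq, hr, not_false_iff, true_and, List.cons_ne_nil,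
            List.mem_cons, forall_eq_or_imp, hdvd, true_and]
          rw [show c + 1 + (rest.length : Int) = c + ((rest.length : Int) + 1) from by ring]
    · simp only [hdvd, ite_false]
      have hc : c ≠ n := by omega
      rw [if_neg hc, ih c (by omega)]
      have h1 : ¬ (rest ≠ [] ∧ c + (rest.length : Int) = n ∧ ∀ j ∈ rest, PySem.Int.mod j i = 0) := by
        rintro ⟨_, he, _⟩; omega
      have h2 : ¬ ((j :: rest) ≠ [] ∧ c + ((rest.length : Int) + 1) = n ∧
          ∀ x ∈ j :: rest, PySem.Int.mod x i = 0) := by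
        rintro ⟨_, _, hall⟩; exact hdvd (hall j (List.mem_cons_self))
      rw [if_neg h1, if_neg h2]

-- both traversals agree step by step (conditions are both "i divides every element")
theorem outer_eq_find (lista : List Int) (hne : lista ≠ []) :
    ∀ rest : List Int,
      NumeroDiv_outer lista rest =
        NumeroDiv_altFind (lista.foldl (fun g x => pyGcdStep g x.natAbs) 0) rest := by
  intro rest
  induction rest with
  | nil => rfl
  | cons i r ih =>
    unfold NumeroDiv_outer NumeroDiv_altFind
    rw [inner_eq i (lista.length : Int) lista 0 (by omega)]
    have hfold : (lista.foldl (fun g x => pyGcdStep g x.natAbs) 0) =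
        (lista.foldl (fun g x => Nat.gcd g x.natAbs) 0) := by
      congr 1; funext g x; exact pyGcdStep_eq_gcd x.natAbs g
    have hA : (lista ≠ [] ∧ 0 + (lista.length : Int) = (lista.length : Int) ∧
          ∀ j ∈ lista, PySem.Int.mod j i = 0) ↔ (∀ j ∈ lista, i ∣ j) := by
      simp [hne, PySem.Int.mod_eq_zero_iff_dvd]
    have hB : PySem.Int.mod ((lista.foldl (fun g x => pyGcdStep g x.natAbs) 0 : Nat) : Int) i = 0 ↔
        (∀ j ∈ lista, i ∣ j) := by
      rw [PySem.Int.mod_eq_zero_iff_dvd, hfold, dvd_fold_gcd]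
      simp
    by_cases hp : ∀ j ∈ lista, i ∣ j
    · rw [if_pos (hA.mpr hp), if_pos (hB.mpr hp)]
    · rw [if_neg (fun h => hp (hA.mp h)), if_neg (fun h => hp (hB.mp h)), ih]

theorem ports_agree (lista : List Int) : NumeroDiv lista = NumeroDiv_alt lista := by
  cases hl : lista with
  | nil => rfl
  | cons a l =>
    unfold NumeroDiv NumeroDiv_alt
    exact outer_eq_find (a :: l) (List.cons_ne_nil a l) (a :: l)

-- ===== VERDICT (by name: the statement is the Claim_ definition above) =====
theorem NumeroDiv_spec : Claim_equal_NumeroDiv := by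
  intro lista _ _
  unfold Spec_NumeroDiv
  exact ports_agree lista
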